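-- pv_equiv track=rewrite | github.com/andreii7/PyBase08 | hw_4_2_v1.py | get_eng_words
-- ===== SOURCE A (Python) =====
-- def get_eng_words(text):
--     result = list()
--     for i in range(len(text)):
--         text[i] = text[i].lower()
--
--     for i in text:
--         if i not in result and i != '':
--             result.append(i)
--
--     """
--     Функция из заданного текста формирует список слов, которые состоят исключительно из символов
--     английского алфавита.
--
--     :param text: текст в виде списка строк.
--         В строке допустимы любые символы в любом регистре, а также
--         * знаки препинания (string.punctuation),
--         * цифры (string.digits)
--         * непечатаемые символы (string.whitespace)
--
--     :return: result - список строк, где каждая строка - это слово: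
--         * Слова состоят исключительно из символов английского алфавита в нижнем регистре.
--         * Слова не должны повторяться.
--     """
--
--     return result
-- ===== SOURCE B (Python) =====
-- def get_eng_words(text):
--     for i in range(len(text)):
--         text[i] = text[i].lower()
--     # filter-remove dedup: repeatedly take the head of the worklist and delete
--     # every copy of it from the worklist; keeps first occurrences in order.
--     result = []
--     ws = [w for w in text if w != '']
--     while ws:
--         head = ws[0]
--         result.append(head)
--         ws = [w for w in ws if w != head]
--     return result
-- ===== Notes on version B (the rewrite author's own statement) =====
-- stated objective: alternative
-- what changed: Replaces A's scan-and-append dedup (membership test of each word against the growing result) by a filter-remove worklist loop: take the head, append it, and delete every copy of it from the remaining worklist, so no membership test is ever made; the observable in-place lowercasing pass is kept.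
import Mathlib
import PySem

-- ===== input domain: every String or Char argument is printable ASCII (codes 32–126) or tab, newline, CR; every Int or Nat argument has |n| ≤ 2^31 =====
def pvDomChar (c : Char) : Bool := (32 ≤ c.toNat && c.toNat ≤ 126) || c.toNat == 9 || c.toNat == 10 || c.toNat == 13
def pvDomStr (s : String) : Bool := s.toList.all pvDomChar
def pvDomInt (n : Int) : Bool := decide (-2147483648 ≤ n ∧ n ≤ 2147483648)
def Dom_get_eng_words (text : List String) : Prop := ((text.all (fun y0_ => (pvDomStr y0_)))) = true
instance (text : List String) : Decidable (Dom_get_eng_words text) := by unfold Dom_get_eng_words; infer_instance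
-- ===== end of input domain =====

-- B replaces A's scan-and-append dedup (membership test against the growing result) by a
-- filter-remove worklist loop (append the head, delete all its copies from the worklist);
-- the equivalence is about the RETURN value (both Pythons also lowercase the argument list
-- in place identically).

-- ===== PORT A =====
def get_eng_words (text : List String) : List String :=
  -- first loop: text[i] = text[i].lower()
  let text := text.map PySem.Str.lower
  -- second loop: append i when i not in result and i != ''
  text.foldl (fun result i =>
    if i ∉ result ∧ i ≠ "" then result ++ [i] else result) []

-- ===== PORT B =====
-- the while loop of Source B: pop the head into result, filter it out of the worklist
def pvFilterRemove : List String → List String → List String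
  | [], result => result
  | head :: t, result =>
      pvFilterRemove ((head :: t).filter (fun w => w ≠ head)) (result ++ [head])
termination_by ws _ => ws.length
decreasing_by
  have := List.length_filter_le (fun w => !decide (w = head)) t
  simp
  omega

def get_eng_words_alt (text : List String) : List String :=
  let text := text.map PySem.Str.lower
  pvFilterRemove (text.filter (fun w => w ≠ "")) []

-- ===== PRECONDITION & SPEC =====
def Spec_get_eng_words (text : List String) (out : List String) : Prop := out = get_eng_words_alt text
instance (text : List String) (out : List String) : Decidable (Spec_get_eng_words text out) := by unfold Spec_get_eng_words; infer_instance

-- ===== CLAIM (what is proved, stated in full; the proofs are below) =====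
def Claim_equal_get_eng_words : Prop := ∀ (text : List String), Dom_get_eng_words text → Spec_get_eng_words text (get_eng_words text)

-- ===== LEMMAS AND PROOFS =====

-- A's append-if loop over any list equals folding PySem.Set.add over the nonempty elements.
theorem pv_loop_eq (xs : List String) : ∀ (acc : List String),
    xs.foldl (fun result i => if i ∉ result ∧ i ≠ "" then result ++ [i] else result) acc
      = (xs.filter (fun w => w ≠ "")).foldl PySem.Set.add acc := by
  induction xs with
  | nil => intro acc; rfl
  | cons x xs ih =>
    intro acc
    by_cases hx : x = ""
    · simp [hx, List.foldl_cons, ih]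
    · have hf : (x :: xs).filter (fun w => w ≠ "") = x :: xs.filter (fun w => w ≠ "") := by
        simp [hx]
      rw [hf, List.foldl_cons, List.foldl_cons, ih]
      have hadd : (if x ∉ acc ∧ x ≠ "" then acc ++ [x] else acc) = PySem.Set.add acc x := by
        by_cases hm : x ∈ acc <;> simp [PySem.Set.add, hm, hx]
      rw [hadd]

-- Set.add skips elements already in the accumulator, so filtering them out is harmless.
theorem pv_fold_filter (h : String) (t : List String) : ∀ (acc : List String), h ∈ acc →
    t.foldl PySem.Set.add acc = (t.filter (fun w => w ≠ h)).foldl PySem.Set.add acc := by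
  induction t with
  | nil => intro acc _; rfl
  | cons y t ih =>
    intro acc hacc
    by_cases hy : y = h
    · subst hy
      have : PySem.Set.add acc y = acc := by simp [PySem.Set.add, hacc]
      simp [this, ih acc hacc]
    · have hmem : h ∈ PySem.Set.add acc y := by
        by_cases hm : y ∈ acc <;> simp [PySem.Set.add, hm, hacc]
      simp [hy, ih _ hmem]

-- The fold of Set.add equals the filter-remove loop when the worklist avoids the accumulator.
theorem pv_fold_eq_filterRemove (n : Nat) : ∀ (ws acc : List String), ws.length ≤ n →
    (∀ w ∈ ws, w ∉ acc) →
    ws.foldl PySem.Set.add acc = pvFilterRemove ws acc := by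
  induction n with
  | zero =>
    intro ws acc hlen _
    have : ws = [] := List.eq_nil_of_length_eq_zero (Nat.le_zero.mp hlen)
    subst this; rw [pvFilterRemove]; rfl
  | succ n ih =>
    intro ws acc hlen hdisj
    match ws with
    | [] => rw [pvFilterRemove]; rfl
    | h :: t =>
      have hna : h ∉ acc := hdisj h (by simp)
      have hadd : PySem.Set.add acc h = acc ++ [h] := by simp [PySem.Set.add, hna]
      have hstep : (h :: t).foldl PySem.Set.add acc
          = (t.filter (fun w => w ≠ h)).foldl PySem.Set.add (acc ++ [h]) := by
        rw [List.foldl_cons, hadd, pv_fold_filter h t (acc ++ [h]) (by simp)]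
      have hfr : pvFilterRemove (h :: t) acc
          = pvFilterRemove (t.filter (fun w => w ≠ h)) (acc ++ [h]) := by
        rw [pvFilterRemove]; simp
      rw [hstep, hfr]
      apply ih
      · have h1 := List.length_filter_le (fun w => w ≠ h) t
        have h2 : t.length + 1 ≤ n + 1 := by simpa using hlen
        omega
      · intro w hw
        have hwt := List.mem_filter.mp hw
        have hne : w ≠ h := by simpa using hwt.2
        have := hdisj w (List.mem_cons_of_mem _ hwt.1)
        simp [this, hne]

-- ===== VERDICT (by name: the statement is the Claim_ definition above) =====
theorem get_eng_words_spec : Claim_equal_get_eng_words := by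
  intro text _
  unfold Spec_get_eng_words get_eng_words get_eng_words_alt
  rw [pv_loop_eq]
  exact pv_fold_eq_filterRemove _ _ [] le_rfl (by simp)
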